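-- pv_equiv track=rewrite | github.com/kharrigian/ml4h-eye-on-clinical-bert | cce/model/labelers.py | _extract_array_spans
-- ===== SOURCE A (Python) =====
-- def _extract_array_spans(
--                          array):
--     """
--
--     """
--     ## Base Case (All Zeros)
--     if sum(array) == 0:
--         return []
--     ## Look for Spans
--     spans = []
--     cur_label = None
--     cur_span_start = None
--     for i, a in enumerate(array):
--         if a == 0:
--             if cur_span_start is not None:
--                 spans.append((cur_label, (cur_span_start, i)))
--                 cur_span_start = None
--                 cur_label = None
--             continue
--         if a % 2 == 1: ## Start of New Span
--             if cur_span_start is not None: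
--                 spans.append((cur_label, (cur_span_start, i)))
--             cur_span_start = i
--             cur_label = a
--         elif a % 2 == 0: ## Continuation of Span
--             if cur_label is None or a - cur_label != 1: ## Invalid Span (Ignore)
--                 continue
--     if cur_span_start is not None:
--         spans.append((cur_label, (cur_span_start, i + 1)))
--     return spans
-- ===== SOURCE B (Python) =====
-- def _extract_array_spans(array):
--     ## Base Case (All Zeros)
--     if sum(array) == 0:
--         return []
--     ## Each odd element starts a span; scan forward to the first 0-or-odd element (or the end)
--     n = len(array)
--     spans = []
--     for i, a in enumerate(array):
--         if a % 2 == 1: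
--             j = i + 1
--             while j < n and array[j] != 0 and array[j] % 2 != 1:
--                 j += 1
--             spans.append((a, (i, j)))
--     return spans
-- ===== Notes on version B (the rewrite author's own statement) =====
-- stated objective: alternative
-- what changed: Replaced A's single-pass state machine (cur_label/cur_span_start carried across the loop, with an end-of-array flush) by a per-start decomposition: every odd element opens a span and a forward scan finds its end at the first 0-or-odd element.
import Mathlib
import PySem

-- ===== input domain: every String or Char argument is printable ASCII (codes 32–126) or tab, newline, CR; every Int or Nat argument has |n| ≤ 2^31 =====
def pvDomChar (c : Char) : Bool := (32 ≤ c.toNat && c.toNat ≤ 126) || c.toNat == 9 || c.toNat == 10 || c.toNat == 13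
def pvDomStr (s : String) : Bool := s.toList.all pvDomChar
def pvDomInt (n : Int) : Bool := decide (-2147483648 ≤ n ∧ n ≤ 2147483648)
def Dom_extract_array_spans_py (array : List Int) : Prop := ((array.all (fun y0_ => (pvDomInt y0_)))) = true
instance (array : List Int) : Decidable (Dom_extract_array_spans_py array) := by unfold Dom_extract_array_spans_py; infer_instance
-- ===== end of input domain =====

-- B replaces A's carried cur_label/cur_span_start state machine by a per-odd-start forward scan; same output, similar cost.

-- ===== PORT A =====
-- the loop of A: state (spans, cur_label, cur_span_start), index i carried explicitly
def aLoop : List Int → Int → List (Int × (Int × Int)) → Option Int → Option Int →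
    List (Int × (Int × Int)) × Option Int × Option Int
  | [], _, spans, cl, cs => (spans, cl, cs)
  | a :: t, i, spans, cl, cs =>
    if a = 0 then
      match cs with
      | some s => aLoop t (i + 1) (spans ++ [(cl.getD 0, (s, i))]) none none
      | none => aLoop t (i + 1) spans cl cs
    else if PySem.Int.mod a 2 = 1 then
      aLoop t (i + 1)
        (match cs with
         | some s => spans ++ [(cl.getD 0, (s, i))]
         | none => spans) (some a) (some i)
    else
      -- a % 2 == 0 branch: the inner invalid-span check only `continue`s, no state change
      aLoop t (i + 1) spans cl cs

def extract_array_spans_py (array : List Int) : List (Int × (Int × Int)) :=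
  if array.sum = 0 then []
  else
    match aLoop array 0 [] none none with
    -- after the loop, i + 1 = array.length (the loop ran: sum ≠ 0 forces array ≠ [])
    | (spans, cl, some s) => spans ++ [(cl.getD 0, (s, (array.length : Int)))]
    | (spans, _, none) => spans

-- ===== PORT B =====
-- forward scan: first index ≥ j (over the remaining list) holding 0 or an odd value, else the end
def bEnd : List Int → Int → Int
  | [], j => j
  | a :: t, j => if a = 0 ∨ PySem.Int.mod a 2 = 1 then j else bEnd t (j + 1)

def bLoop : List Int → Int → List (Int × (Int × Int))
  | [], _ => []
  | a :: t, i =>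
    if PySem.Int.mod a 2 = 1 then (a, (i, bEnd t (i + 1))) :: bLoop t (i + 1)
    else bLoop t (i + 1)

def extract_array_spans_py_alt (array : List Int) : List (Int × (Int × Int)) :=
  if array.sum = 0 then [] else bLoop array 0

-- ===== PRECONDITION & SPEC =====
def Spec_extract_array_spans_py (array : List Int) (out : List (Int × (Int × Int))) : Prop := out = extract_array_spans_py_alt array
instance (array : List Int) (out : List (Int × (Int × Int))) : Decidable (Spec_extract_array_spans_py array out) := by unfold Spec_extract_array_spans_py; infer_instance

-- ===== CLAIM (what is proved, stated in full; the proofs are below) =====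
def Claim_equal_extract_array_spans_py : Prop := ∀ (array : List Int), Dom_extract_array_spans_py array → Spec_extract_array_spans_py array (extract_array_spans_py array)

-- ===== LEMMAS AND PROOFS =====

-- finalize A's post-loop state with end index e (proof-side helper)
def aFin (e : Int) : List (Int × (Int × Int)) × Option Int × Option Int → List (Int × (Int × Int))
  | (spans, cl, some s) => spans ++ [(cl.getD 0, (s, e))]
  | (spans, _, none) => spans

-- joint invariant: o = none ↔ not inside a span; o = some (l, s) ↔ inside span (label l, start s)
lemma aLoop_bLoop (t : List Int) : ∀ (i : Int) (spans : List (Int × (Int × Int)))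
    (o : Option (Int × Int)),
    aFin (i + t.length) (aLoop t i spans (o.map Prod.fst) (o.map Prod.snd)) =
      spans ++ (match o with
        | some (l, s) => (l, (s, bEnd t i)) :: bLoop t i
        | none => bLoop t i) := by
  induction t with
  | nil =>
    intro i spans o
    cases o with
    | none => simp [aLoop, aFin, bLoop]
    | some p => obtain ⟨l, s⟩ := p; simp [aLoop, aFin, bLoop, bEnd]
  | cons a t ih =>
    intro i spans o
    have hlen : i + ((a :: t).length : Int) = (i + 1) + (t.length : Int) := by
      simp; ring
    by_cases h0 : a = 0
    · subst h0
      have hm : ¬ PySem.Int.mod (0:Int) 2 = 1 := by decide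
      cases o with
      | none =>
        simp only [aLoop, bLoop, Option.map, if_neg hm, hlen]
        exact ih (i + 1) spans none
      | some p =>
        obtain ⟨l, s⟩ := p
        simp only [aLoop, bLoop, bEnd, Option.map, if_neg hm, hlen]
        have h1 := ih (i + 1) (spans ++ [(l, (s, i))]) none
        simp only [Option.map, Option.getD, List.append_assoc] at h1 ⊢
        simpa using h1
    · by_cases hodd : PySem.Int.mod a 2 = 1
      · cases o with
        | none =>
          simp only [aLoop, bLoop, Option.map, if_neg h0, if_pos hodd, hlen]
          have h1 := ih (i + 1) spans (some (a, i))
          simp only [Option.map] at h1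
          simpa using h1
        | some p =>
          obtain ⟨l, s⟩ := p
          simp only [aLoop, bLoop, bEnd, Option.map, if_neg h0, if_pos hodd,
            if_pos (Or.inr hodd), hlen]
          have h1 := ih (i + 1) (spans ++ [(l, (s, i))]) (some (a, i))
          simp only [Option.map, Option.getD, List.append_assoc] at h1 ⊢
          simpa using h1
      · have hne : ¬ (a = 0 ∨ PySem.Int.mod a 2 = 1) := by rintro (h | h); exacts [h0 h, hodd h]
        cases o with
        | none =>
          simp only [aLoop, bLoop, Option.map, if_neg h0, if_neg hodd, hlen]
          exact ih (i + 1) spans none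
        | some p =>
          obtain ⟨l, s⟩ := p
          simp only [aLoop, bLoop, bEnd, Option.map, if_neg h0, if_neg hodd,
            if_neg hne, hlen]
          have h1 := ih (i + 1) spans (some (l, s))
          simp only [Option.map] at h1
          simpa using h1

-- ===== VERDICT (by name: the statement is the Claim_ definition above) =====
theorem extract_array_spans_py_spec : Claim_equal_extract_array_spans_py := by
  intro array _
  unfold Spec_extract_array_spans_py extract_array_spans_py extract_array_spans_py_alt
  by_cases hs : array.sum = 0
  · simp [hs]
  · have h := aLoop_bLoop array 0 [] none
    simp only [Option.map, zero_add, List.nil_append] at h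
    simp only [if_neg hs]
    rcases hE : aLoop array 0 [] none none with ⟨spans, cl, cs⟩
    rw [hE] at h
    cases cs <;> simp [aFin] at h <;> simp [h]
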